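-- pv_equiv track=rewrite | github.com/Lukes-Git-Beginning/slot-booking-webapp | level_system.py | get_best_badge
-- ===== SOURCE A (Python) =====
-- def get_best_badge(badges):
--     """Finde die beste Badge basierend auf Seltenheit"""
--     if not badges:
--         return None
--
--     # Sortiere nach Seltenheit
--     rarity_order = ["mythic", "legendary", "epic", "rare", "uncommon", "common"]
--
--     best_badge = None
--     best_rarity_index = len(rarity_order)
--
--     for badge in badges:
--         rarity_index = rarity_order.index(badge["rarity"])
--         if rarity_index < best_rarity_index:
--             best_rarity_index = rarity_index
--             best_badge = badge
--
--     return best_badge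
-- ===== SOURCE B (Python) =====
-- def get_best_badge(badges):
--     """Finde die beste Badge basierend auf Seltenheit"""
--     if not badges:
--         return None
--
--     rarity_order = ["mythic", "legendary", "epic", "rare", "uncommon", "common"]
--
--     # Stable sort by rarity priority; ties keep the earlier badge, like A's strict-< scan.
--     return sorted(badges, key=lambda badge: rarity_order.index(badge["rarity"]))[0]
-- ===== Notes on version B (the rewrite author's own statement) =====
-- stated objective: alternative
-- what changed: Replaces A's running-minimum scan with a stable sort of the badges by rarity index followed by taking element 0 (sort stability reproduces A's first-wins tie-breaking).
import Mathlib
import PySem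

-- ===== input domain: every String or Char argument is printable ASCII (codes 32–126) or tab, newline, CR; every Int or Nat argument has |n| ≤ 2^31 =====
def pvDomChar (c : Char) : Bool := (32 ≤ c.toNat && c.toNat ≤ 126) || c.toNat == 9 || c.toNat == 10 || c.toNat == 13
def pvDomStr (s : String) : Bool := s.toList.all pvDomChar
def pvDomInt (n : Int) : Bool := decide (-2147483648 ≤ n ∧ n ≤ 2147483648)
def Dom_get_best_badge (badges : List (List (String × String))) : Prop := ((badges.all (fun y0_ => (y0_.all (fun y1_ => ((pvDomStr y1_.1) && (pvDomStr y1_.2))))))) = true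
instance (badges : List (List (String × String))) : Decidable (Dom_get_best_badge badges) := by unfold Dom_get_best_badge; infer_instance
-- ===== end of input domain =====

-- B replaces A's running-minimum scan with a stable sort by rarity index and taking element 0 (alternative decomposition, same results).

-- rarity_order = ["mythic", "legendary", "epic", "rare", "uncommon", "common"]  (shared constant of both Pythons)
def pvRarityOrder : List String := ["mythic", "legendary", "epic", "rare", "uncommon", "common"]

-- rarity_order.index(badge["rarity"]); total via getD (guarded by Pre_, where the key exists and its value is in the list)
def pvRarityIdx (badge : List (String × String)) : Nat :=
  (PySem.List.index? pvRarityOrder ((List.lookup "rarity" badge).getD "")).getD 6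

-- ===== PORT A =====
def get_best_badge (badges : List (List (String × String))) : Option (List (String × String)) :=
  if badges = [] then none
  else
    (badges.foldl
      (fun (st : Option (List (String × String)) × Nat) badge =>
        let rarity_index := pvRarityIdx badge
        if rarity_index < st.2 then (some badge, rarity_index) else st)
      (none, pvRarityOrder.length)).1

-- ===== PORT B =====
def get_best_badge_alt (badges : List (List (String × String))) : Option (List (String × String)) :=
  if badges = [] then none
  else PySem.List.pyGet? (PySem.List.sorted badges pvRarityIdx) 0

-- ===== PRECONDITION & SPEC =====
-- Pre_ excludes exactly the inputs on which both Pythons raise: a badge without a "rarity" key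
-- (KeyError) or with a rarity string not in rarity_order (ValueError from .index).
def Pre_get_best_badge (badges : List (List (String × String))) : Prop :=
  (badges.all (fun b => pvRarityOrder.contains ((List.lookup "rarity" b).getD ""))) = true
instance (badges : List (List (String × String))) : Decidable (Pre_get_best_badge badges) := by
  unfold Pre_get_best_badge; infer_instance

def pvWitness_get_best_badge : (List (List (String × String))) :=
  [[("rarity", "epic")], [("rarity", "mythic"), ("name", "x")], [("rarity", "epic")]]

def Spec_get_best_badge (badges : List (List (String × String))) (out : Option (List (String × String))) : Prop := out = get_best_badge_alt badges
instance (badges : List (List (String × String))) (out : Option (List (String × String))) : Decidable (Spec_get_best_badge badges out) := by unfold Spec_get_best_badge; infer_instance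

-- ===== CLAIM (what is proved, stated in full; the proofs are below) =====
def Claim_equal_get_best_badge : Prop := ∀ (badges : List (List (String × String))), Dom_get_best_badge badges → Pre_get_best_badge badges → Spec_get_best_badge badges (get_best_badge badges)

-- ===== LEMMAS AND PROOFS =====

-- the first-wins minimum combiner both proofs reduce to
def pvBest (m x : List (String × String)) : List (String × String) :=
  if pvRarityIdx x < pvRarityIdx m then x else m

-- A's loop, once seeded with a first element, is the running pvBest fold
theorem pvA_fold (t : List (List (String × String))) (m : List (String × String)) :
    t.foldl
      (fun (st : Option (List (String × String)) × Nat) badge =>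
        let rarity_index := pvRarityIdx badge
        if rarity_index < st.2 then (some badge, rarity_index) else st)
      (some m, pvRarityIdx m)
    = (some (t.foldl pvBest m), pvRarityIdx (t.foldl pvBest m)) := by
  induction t generalizing m with
  | nil => rfl
  | cons x t ih =>
    simp only [List.foldl_cons]
    by_cases h : pvRarityIdx x < pvRarityIdx m
    · simpa [pvBest, h] using ih x
    · simpa [pvBest, h] using ih m

-- insertion sort keeps the running pvBest at the head
theorem pvB_head (t : List (List (String × String))) (m : List (String × String))
    (rest : List (List (String × String))) :
    ∃ rest', t.foldl
      (fun acc x => PySem.List.insertBy (fun a b => decide (pvRarityIdx a < pvRarityIdx b)) x acc)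
      (m :: rest)
      = (t.foldl pvBest m) :: rest' := by
  induction t generalizing m rest with
  | nil => exact ⟨rest, rfl⟩
  | cons x t ih =>
    simp only [List.foldl_cons]
    by_cases h : pvRarityIdx x < pvRarityIdx m
    · simpa [PySem.List.insertBy, h, pvBest] using ih x (m :: rest)
    · simpa [PySem.List.insertBy, h, pvBest] using
        ih m (PySem.List.insertBy (fun a b => decide (pvRarityIdx a < pvRarityIdx b)) x rest)

theorem pvIdx_lt (b : List (String × String))
    (h : pvRarityOrder.contains ((List.lookup "rarity" b).getD "") = true) :
    pvRarityIdx b < pvRarityOrder.length := by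
  have hmem : ((List.lookup "rarity" b).getD "") ∈ pvRarityOrder := by
    simpa using h
  obtain ⟨k, hk⟩ := (PySem.List.index?_isSome_iff (xs := pvRarityOrder)
      (v := (List.lookup "rarity" b).getD "")).mpr hmem |> Option.isSome_iff_exists.mp
  obtain ⟨hlt, -, -⟩ := PySem.List.getElem_of_index?_eq_some hk
  simp only [pvRarityIdx, hk, Option.getD_some]
  exact hlt

-- ===== VERDICT (by name: the statement is the Claim_ definition above) =====
theorem get_best_badge_spec : Claim_equal_get_best_badge := by
  intro badges _ hpre
  unfold Spec_get_best_badge get_best_badge get_best_badge_alt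
  cases badges with
  | nil => rfl
  | cons x t =>
    have hx : pvRarityIdx x < pvRarityOrder.length := by
      apply pvIdx_lt
      have := hpre
      simp only [Pre_get_best_badge, List.all_cons, Bool.and_eq_true] at this
      exact this.1
    simp only [if_neg (List.cons_ne_nil x t)]
    -- A side
    rw [List.foldl_cons]
    simp only [if_pos hx]
    rw [pvA_fold]
    -- B side
    rw [PySem.List.sorted_eq_foldl_insertBy, List.foldl_cons]
    obtain ⟨rest', hrest⟩ := pvB_head t x []
    have : PySem.List.insertBy (fun a b => decide (pvRarityIdx a < pvRarityIdx b)) x [] = [x] := rfl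
    rw [this, hrest, PySem.List.pyGet?_zero_cons]
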